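-- pv_equiv track=rewrite | github.com/pranshubhatt/POMDP | health-chatbot/backend/medical_knowledge.py | get_related_conditions
-- ===== SOURCE A (Python) =====
-- from typing import Dict, List, Set, Optional, Union
--
-- CONDITION_CATEGORIES = {
--     "respiratory": {
--         "upper_respiratory": ["common_cold", "flu", "sinusitis"],
--         "lower_respiratory": ["bronchitis", "pneumonia", "covid19"]
--     },
--     "neurological": {
--         "headaches": ["migraine", "tension_headache"],
--         "cognitive": ["concussion", "meningitis"]
--     },
--     "gastrointestinal": {
--         "stomach": ["gastritis", "food_poisoning"],
--         "intestinal": ["ibs", "gastroenteritis"]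
--     }
-- }
--
-- def get_condition_category(condition: str) -> str:
--     """
--     Get the category of a condition.
--     """
--     for category, subcategories in CONDITION_CATEGORIES.items():
--         for subcategory, conditions in subcategories.items():
--             if condition in conditions:
--                 return f"{category}/{subcategory}"
--     return "unknown"
--
-- def get_related_conditions(condition: str) -> List[str]:
--     """
--     Get related conditions based on shared category and symptoms.
--     """
--     category = get_condition_category(condition)
--     if category == "unknown":
--         return []
--
--     main_category = category.split('/')[0]
--     related = []
--
--     # Get conditions in the same category
--     for subcategories in CONDITION_CATEGORIES[main_category].values():
--         for related_condition in subcategories: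
--             if related_condition != condition:
--                 related.append(related_condition)
--
--     return related
-- ===== SOURCE B (Python) =====
-- CONDITION_CATEGORIES = {
--     "respiratory": {
--         "upper_respiratory": ["common_cold", "flu", "sinusitis"],
--         "lower_respiratory": ["bronchitis", "pneumonia", "covid19"]
--     },
--     "neurological": {
--         "headaches": ["migraine", "tension_headache"],
--         "cognitive": ["concussion", "meningitis"]
--     },
--     "gastrointestinal": {
--         "stomach": ["gastritis", "food_poisoning"],
--         "intestinal": ["ibs", "gastroenteritis"]
--     }
-- }
--
-- def get_related_conditions(condition):
--     for subcategories in CONDITION_CATEGORIES.values():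
--         flat = [c for conds in subcategories.values() for c in conds]
--         if condition in flat:
--             return [c for c in flat if c != condition]
--     return []
-- ===== Notes on version B (the rewrite author's own statement) =====
-- stated objective: simpler
-- what changed: Dropped the get_condition_category helper and its category-path string building, split and dict re-indexing: B flattens each main category once and fuses the membership test with collecting the siblings in a single pass, returning the flat list minus the condition.
import Mathlib
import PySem

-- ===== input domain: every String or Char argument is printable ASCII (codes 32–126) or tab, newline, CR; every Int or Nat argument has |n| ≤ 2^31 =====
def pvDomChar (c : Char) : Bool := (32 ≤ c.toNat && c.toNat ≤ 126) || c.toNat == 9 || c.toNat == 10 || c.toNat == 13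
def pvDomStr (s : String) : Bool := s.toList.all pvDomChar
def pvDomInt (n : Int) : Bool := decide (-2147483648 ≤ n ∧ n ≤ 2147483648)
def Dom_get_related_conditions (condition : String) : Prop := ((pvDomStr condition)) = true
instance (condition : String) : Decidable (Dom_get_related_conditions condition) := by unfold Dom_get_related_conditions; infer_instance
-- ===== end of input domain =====

-- B drops the get_condition_category helper (no category-path string, no split, no dict re-indexing):
-- it flattens each main category once and fuses the membership test with collecting siblings; objective: simpler.

-- CONDITION_CATEGORIES (shared module constant; Python dict → PySem.Dict in insertion order)
def pvCC : PySem.Dict String (PySem.Dict String (List String)) := PySem.Dict.mk [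
  ("respiratory", PySem.Dict.mk [
    ("upper_respiratory", ["common_cold", "flu", "sinusitis"]),
    ("lower_respiratory", ["bronchitis", "pneumonia", "covid19"])]),
  ("neurological", PySem.Dict.mk [
    ("headaches", ["migraine", "tension_headache"]),
    ("cognitive", ["concussion", "meningitis"])]),
  ("gastrointestinal", PySem.Dict.mk [
    ("stomach", ["gastritis", "food_poisoning"]),
    ("intestinal", ["ibs", "gastroenteritis"])])]

-- ===== PORT A =====
-- inner loop of get_condition_category (early return → Option)
def pvGccInner (condition cat : String) : List (String × List String) → Option String
  | [] => none
  | (sub, conds) :: rest =>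
    if condition ∈ conds then some (PySem.Str.join "" [cat, "/", sub])
    else pvGccInner condition cat rest

-- outer loop of get_condition_category
def pvGccOuter (condition : String) : List (String × PySem.Dict String (List String)) → String
  | [] => "unknown"
  | (cat, subs) :: rest =>
    match pvGccInner condition cat subs.items with
    | some s => s
    | none => pvGccOuter condition rest

def get_condition_category (condition : String) : String :=
  pvGccOuter condition pvCC.items

def get_related_conditions (condition : String) : List String :=
  let category := get_condition_category condition
  if category = "unknown" then []
  else
    -- category.split('/')[0]: split is never empty, so index 0 always exists
    -- split? is some here since the separator "/" is nonempty
    let main_category := PySem.List.pyGetD ((PySem.Str.split? category "/").getD []) 0 ""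
    -- CONDITION_CATEGORIES[main_category]: the key always exists here (category ≠ "unknown")
    match pvCC.get? main_category with
    | none => []
    | some subdict =>
      subdict.values.foldl (fun related subcategories =>
        subcategories.foldl (fun acc rc => if rc ≠ condition then acc ++ [rc] else acc) related) []

-- ===== PORT B =====
def pvAltGo (condition : String) : List (PySem.Dict String (List String)) → List String
  | [] => []
  | subcategories :: rest =>
    let flat := subcategories.values.flatten
    if condition ∈ flat then flat.filter (fun c => c ≠ condition)
    else pvAltGo condition rest

def get_related_conditions_alt (condition : String) : List String :=
  pvAltGo condition pvCC.values

-- ===== PRECONDITION & SPEC =====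
def Spec_get_related_conditions (condition : String) (out : List String) : Prop := out = get_related_conditions_alt condition
instance (condition : String) (out : List String) : Decidable (Spec_get_related_conditions condition out) := by unfold Spec_get_related_conditions; infer_instance

-- ===== CLAIM (what is proved, stated in full; the proofs are below) =====
def Claim_equal_get_related_conditions : Prop := ∀ (condition : String), Dom_get_related_conditions condition → Spec_get_related_conditions condition (get_related_conditions condition)

-- ===== LEMMAS AND PROOFS =====

-- ===== VERDICT (by name: the statement is the Claim_ definition above) =====
theorem get_related_conditions_spec : Claim_equal_get_related_conditions := by
  intro condition _
  unfold Spec_get_related_conditions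
  by_cases h1 : condition = "common_cold"; · subst h1; decide
  by_cases h2 : condition = "flu"; · subst h2; decide
  by_cases h3 : condition = "sinusitis"; · subst h3; decide
  by_cases h4 : condition = "bronchitis"; · subst h4; decide
  by_cases h5 : condition = "pneumonia"; · subst h5; decide
  by_cases h6 : condition = "covid19"; · subst h6; decide
  by_cases h7 : condition = "migraine"; · subst h7; decide
  by_cases h8 : condition = "tension_headache"; · subst h8; decide
  by_cases h9 : condition = "concussion"; · subst h9; decide
  by_cases h10 : condition = "meningitis"; · subst h10; decide
  by_cases h11 : condition = "gastritis"; · subst h11; decide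
  by_cases h12 : condition = "food_poisoning"; · subst h12; decide
  by_cases h13 : condition = "ibs"; · subst h13; decide
  by_cases h14 : condition = "gastroenteritis"; · subst h14; decide
  simp [get_related_conditions, get_related_conditions_alt, get_condition_category,
    pvCC, pvGccOuter, pvGccInner, pvAltGo,
    h1, h2, h3, h4, h5, h6, h7, h8, h9, h10, h11, h12, h13, h14]
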